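-- pv_equiv track=rewrite | github.com/alex-haozheng/lc | 999-available-captures-for-rook.py | numRookCaptures
-- ===== SOURCE A (Python) =====
-- from typing import List
--
-- def numRookCaptures(board: List[List[str]]) -> int:
--     ret = 0
--     for r, rowList in enumerate(board):
--         if 'R' in rowList:
--             c = rowList.index('R')
--             break
--
--     # rook coordinates (r,c)
--     for i in range(r-1, -1, -1):
--         if board[i][c] != '.':
--             if board[i][c] == 'p':
--                 ret += 1
--             break
--
--     for i in range(r+1, len(board)):
--         if board[i][c] != '.':
--             if board[i][c] == 'p':
--                 ret += 1
--             break
--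
--     for i in range(c-1, -1, -1):
--         if board[r][i] != '.':
--             if board[r][i] == 'p':
--                 ret += 1
--             break
--
--     for i in range(c+1, len(board[0])):
--         if board[r][i] != '.':
--             if board[r][i] == 'p':
--                 ret += 1
--             break
--
--     return ret
-- ===== SOURCE B (Python) =====
-- def numRookCaptures(board):
--     r, c = next((i, row.index('R')) for i, row in enumerate(board) if 'R' in row)
--     count = 0
--     for line, k in ((board[r], c), ([rw[c] for rw in board], r)):
--         before = [x for x in line[:k] if x != '.']
--         after = [x for x in line[k + 1:] if x != '.']
--         count += (before[-1:] == ['p']) + (after[:1] == ['p'])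
--     return count
-- ===== Notes on version B (the rewrite author's own statement) =====
-- stated objective: alternative
-- what changed: Instead of walking outward in four directions until the first non-empty square, B slices the rook's row and column into the parts before and after the rook, filters out the '.' squares, and tests whether the nearest remaining neighbour on each side is 'p'.
-- outside the precondition, e.g. on numRookCaptures([['.', 'R'], ['.', 'x'], ['y']]): A returns 0, B raises IndexError; on numRookCaptures([['R', 'p'], ['p']]): A returns 2, B returns 2
import Mathlib
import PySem

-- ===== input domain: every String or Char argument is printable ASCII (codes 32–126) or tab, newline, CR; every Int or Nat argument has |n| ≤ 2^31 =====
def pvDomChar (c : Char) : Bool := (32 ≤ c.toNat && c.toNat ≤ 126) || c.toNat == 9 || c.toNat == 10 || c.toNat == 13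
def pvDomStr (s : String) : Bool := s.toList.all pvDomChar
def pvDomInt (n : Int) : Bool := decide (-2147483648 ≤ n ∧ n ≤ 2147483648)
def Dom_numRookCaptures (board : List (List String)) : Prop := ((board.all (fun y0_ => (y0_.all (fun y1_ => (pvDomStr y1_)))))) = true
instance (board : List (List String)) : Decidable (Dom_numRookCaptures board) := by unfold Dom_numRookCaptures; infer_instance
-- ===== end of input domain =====

-- B replaces A's four outward walks (stop at the first non-'.' square) by slicing the rook's
-- row and column, filtering out the '.' squares, and testing the nearest remaining neighbours
-- (objective: alternative; same cost).

-- ===== PORT A =====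
-- board[i][j] (indices are nonnegative and in range on every input Pre_ admits)
def cellAt (board : List (List String)) (i j : Int) : String :=
  PySem.List.pyGetD (PySem.List.pyGetD board i []) j ""

-- the first 'for r, rowList in enumerate(board): if 'R' in rowList: c = rowList.index('R'); break'
-- (none = the rook is never found: Python then raises UnboundLocalError, excluded by Pre_)
def findRookA : List (List String) → Int → Option (Int × Int)
  | [], _ => none
  | row :: rest, s =>
    if row.contains "R" then
      match PySem.List.index? row "R" with
      | some c => some (s, (c : Int))
      | none => none
    else findRookA rest (s + 1)

-- one of A's four 'for i in …: if get i != '.': (if get i == 'p': ret += 1); break' loops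
def scanA (get : Int → String) : List Int → Int
  | [] => 0
  | i :: rest => if get i ≠ "." then (if get i = "p" then 1 else 0) else scanA get rest

def numRookCaptures (board : List (List String)) : Int :=
  match findRookA board 0 with
  | none => 0   -- Python raises UnboundLocalError here; Pre_ excludes it
  | some (r, c) =>
    scanA (fun i => cellAt board i c) (PySem.List.pyRange (r - 1) (-1) (-1))
    + scanA (fun i => cellAt board i c) (PySem.List.pyRange (r + 1) (board.length : Int) 1)
    + scanA (fun j => cellAt board r j) (PySem.List.pyRange (c - 1) (-1) (-1))
    + scanA (fun j => cellAt board r j) (PySem.List.pyRange (c + 1) ((board.headD []).length : Int) 1)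

-- ===== PORT B =====
-- next((i, row.index('R')) for i, row in enumerate(board) if 'R' in row)
-- (none = StopIteration, excluded by Pre_)
def findRookB (board : List (List String)) : Option (Int × Int) :=
  ((PySem.List.enumerate board 0).find? (fun p => p.2.contains "R")).bind
    (fun p => (PySem.List.index? p.2 "R").map (fun c => (p.1, (c : Int))))

-- one body of B's 'for line, k in …' loop:
-- before = [x for x in line[:k] if x != '.'];  after = [x for x in line[k+1:] if x != '.']
-- (before[-1:] == ['p']) + (after[:1] == ['p'])   -- last/first element tests, ported via getLast?/head?
def lineHits (line : List String) (k : Int) : Int :=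
  let before := (PySem.List.slice line none (some k)).filter (fun x => x ≠ ".")
  let after := (PySem.List.slice line (some (k + 1)) none).filter (fun x => x ≠ ".")
  (if before.getLast? = some "p" then 1 else 0) + (if after.head? = some "p" then 1 else 0)

def numRookCaptures_alt (board : List (List String)) : Int :=
  match findRookB board with
  | none => 0   -- Python raises StopIteration here; Pre_ excludes it
  | some (r, c) =>
    let rowLine := PySem.List.pyGetD board r []
    let colLine := board.map (fun rw => PySem.List.pyGetD rw c "")   -- [rw[c] for rw in board]
    lineHits rowLine c + lineHits colLine r

-- ===== PRECONDITION & SPEC =====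
-- Pre_ excludes boards with no 'R' cell, on which A raises UnboundLocalError, and non-rectangular
-- boards, on which either program may raise IndexError (A returns on some ragged boards only when a
-- blocker happens to stop each scan before the missing cells; B's full-column comprehension raises
-- there).
def Pre_numRookCaptures (board : List (List String)) : Prop :=
  (board.all (fun row => row.length == (board.headD []).length)
    && board.any (fun row => row.contains "R")) = true
instance (board : List (List String)) : Decidable (Pre_numRookCaptures board) := by
  unfold Pre_numRookCaptures; infer_instance

def pvWitness_numRookCaptures : List (List String) := [["R", "p"], [".", "."]]

def Spec_numRookCaptures (board : List (List String)) (out : Int) : Prop := out = numRookCaptures_alt board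
instance (board : List (List String)) (out : Int) : Decidable (Spec_numRookCaptures board out) := by unfold Spec_numRookCaptures; infer_instance

-- ===== CLAIM (what is proved, stated in full; the proofs are below) =====
def Claim_equal_numRookCaptures : Prop := ∀ (board : List (List String)), Dom_numRookCaptures board → Pre_numRookCaptures board → Spec_numRookCaptures board (numRookCaptures board)

-- ===== LEMMAS AND PROOFS =====

-- the two rook searches find the same square
theorem findRook_eq (bs : List (List String)) : ∀ (s : Int),
    findRookA bs s =
      ((PySem.List.enumerate bs s).find? (fun p => p.2.contains "R")).bind
        (fun p => (PySem.List.index? p.2 "R").map (fun c => (p.1, (c : Int)))) := by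
  induction bs with
  | nil => intro s; simp [findRookA, PySem.List.enumerate_nil]
  | cons row rest ih =>
    intro s
    rw [PySem.List.enumerate_cons]
    by_cases h : row.contains "R"
    · simp only [findRookA, h, if_pos, List.find?_cons_of_pos, Option.bind_some]
      cases h' : PySem.List.index? row "R" <;> simp
    · rw [List.find?_cons_of_neg (by simpa using h)]
      simp only [findRookA, h, ih (s + 1)]
      rw [if_neg Bool.false_ne_true]

-- bounds of the square findRookA reports, relative to the start index; the rook's own row
-- witnesses the column bound
theorem findRookA_bounds (bs : List (List String)) : ∀ (s r c : Int),
    findRookA bs s = some (r, c) →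
    s ≤ r ∧ r - s < (bs.length : Int) ∧ 0 ≤ c ∧
      ∃ row ∈ bs, c < (row.length : Int) := by
  induction bs with
  | nil => intro s r c h; simp [findRookA] at h
  | cons row rest ih =>
    intro s r c h
    by_cases hR : row.contains "R"
    · simp only [findRookA, hR, if_pos] at h
      rcases hk : PySem.List.index? row "R" with _ | k
      · rw [hk] at h; exact absurd h (by simp)
      · rw [hk] at h
        simp only [Option.some.injEq, Prod.mk.injEq] at h
        obtain ⟨rfl, rfl⟩ := h
        rcases PySem.List.getElem_of_index?_eq_some hk with ⟨hlt, -, -⟩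
        refine ⟨le_refl s, by simp only [List.length_cons]; push_cast; omega, by positivity, row,
          by simp, by exact_mod_cast hlt⟩
    · simp only [findRookA, hR] at h
      rcases ih (s + 1) r c h with ⟨h1, h2, h3, row', hrow', h4⟩
      exact ⟨by omega, by simp only [List.length_cons]; push_cast; omega, h3, row',
        by simp [hrow'], h4⟩

-- A's break-scan over any index list = 'is the first kept non-dot cell a pawn?'
theorem scanA_eq_head_filter (get : Int → String) : ∀ (l : List Int),
    scanA get l =
      if ((l.map get).filter (fun x => x ≠ ".")).head? = some "p" then 1 else 0 := by
  intro l
  induction l with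
  | nil => simp [scanA]
  | cons i rest ih =>
    simp only [scanA, List.map_cons, List.filter_cons]
    by_cases h : get i = "."
    · simp [h, ih]
    · simp [h]

-- '[pyGetD xs j for j in range(0, c)]' is the prefix of length c
theorem map_pyGetD_prefix (xs : List String) (d : String) (c : Int)
    (h0 : 0 ≤ c) (hc : c ≤ (xs.length : Int)) :
    (PySem.List.pyRange 0 c 1).map (fun j => PySem.List.pyGetD xs j d) = xs.take c.toNat := by
  have hlen : ((xs.take c.toNat).length : Int) = c := by
    rw [List.length_take]; omega
  have h1 : (PySem.List.pyRange 0 c 1).map (fun j => PySem.List.pyGetD (xs.take c.toNat) j d)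
      = xs.take c.toNat := by
    have h2 := PySem.List.map_pyGetD_pyRange (xs.take c.toNat) d (le_refl (0 : Int))
    rw [PySem.List.len_eq, hlen] at h2
    simpa using h2
  rw [← h1]
  apply List.map_congr_left
  intro j hj
  rw [PySem.List.mem_pyRange_one] at hj
  rw [PySem.List.pyGetD_eq_getElem xs d hj.1 (by omega),
      PySem.List.pyGetD_eq_getElem (xs.take c.toNat) d hj.1 (by omega)]
  simp

-- '[pyGetD xs j for j in range(c-1, -1, -1)]' is that prefix reversed
theorem map_pyGetD_countdown (xs : List String) (d : String) (c : Int)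
    (h0 : 0 ≤ c) (hc : c ≤ (xs.length : Int)) :
    (PySem.List.pyRange (c - 1) (-1) (-1)).map (fun j => PySem.List.pyGetD xs j d)
      = (xs.take c.toNat).reverse := by
  have he : PySem.List.pyRange (c - 1) (-1) (-1) = (PySem.List.pyRange 0 c 1).reverse := by
    rw [PySem.List.pyRange_neg_one_eq_reverse]; norm_num
  rw [he, List.map_reverse, map_pyGetD_prefix xs d c h0 hc]

-- a column cell through the comprehension [rw[c] for rw in board]
theorem cellAt_col (board : List (List String)) (c i : Int) :
    cellAt board i c
      = PySem.List.pyGetD (board.map (fun rw => PySem.List.pyGetD rw c "")) i "" := by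
  have h := PySem.List.pyGetD_map (fun rw => PySem.List.pyGetD rw c "") board i []
  have hnil : PySem.List.pyGetD ([] : List String) c "" = "" := by
    simp [PySem.List.pyGetD, PySem.List.pyGet?]
  rw [hnil] at h
  exact h.symm ▸ rfl

-- ===== VERDICT (by name: the statement is the Claim_ definition above) =====
theorem numRookCaptures_spec : Claim_equal_numRookCaptures := by
  intro board _ hpre
  have hrect : ∀ row ∈ board, row.length = (board.headD []).length := by
    have h1 := ((Bool.and_eq_true _ _).mp hpre).1
    rw [List.all_eq_true] at h1
    intro row hr
    simpa using h1 row hr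
  unfold Spec_numRookCaptures numRookCaptures numRookCaptures_alt
  rw [show findRookB board = findRookA board 0 from by unfold findRookB; rw [findRook_eq]]
  rcases hfind : findRookA board 0 with _ | ⟨r, c⟩
  · rfl
  · obtain ⟨hr0, hrlen, hc0, row, hrow, hclen⟩ := findRookA_bounds board 0 r c hfind
    simp only [sub_zero] at hrlen
    set colLine := board.map (fun rw => PySem.List.pyGetD rw c "") with hcoldef
    set rowLine := PySem.List.pyGetD board r [] with hrowdef
    have hcollen : (colLine.length : Int) = (board.length : Int) := by
      rw [hcoldef, List.length_map]
    have hrowmem : rowLine ∈ board := by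
      rw [hrowdef, PySem.List.pyGetD_eq_getElem board [] hr0 hrlen]
      exact List.getElem_mem _
    have hcols : (rowLine.length : Int) = ((board.headD []).length : Int) := by
      exact_mod_cast hrect rowLine hrowmem
    have hcrow : c < (rowLine.length : Int) := by
      have hrl : (row.length : Int) = ((board.headD []).length : Int) := by
        exact_mod_cast hrect row hrow
      rw [hcols, ← hrl]
      exact hclen
    -- the four A-scans, rewritten through scanA_eq_head_filter
    have hgetcol : (fun i => cellAt board i c) = (fun i => PySem.List.pyGetD colLine i "") := by
      funext i; rw [cellAt_col board c i, hcoldef]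
    have hgetrow : (fun j => cellAt board r j) = (fun j => PySem.List.pyGetD rowLine j "") := by
      funext j; rfl
    have hup : scanA (fun i => cellAt board i c) (PySem.List.pyRange (r - 1) (-1) (-1))
        = (if (((PySem.List.slice colLine none (some r)).filter (fun x => x ≠ ".")).getLast?
            = some "p") then (1 : Int) else 0) := by
      rw [hgetcol, scanA_eq_head_filter,
        map_pyGetD_countdown colLine "" r hr0 (by omega),
        List.filter_reverse, List.head?_reverse, PySem.List.slice_to colLine hr0]
    have hdown : scanA (fun i => cellAt board i c) (PySem.List.pyRange (r + 1) (board.length : Int) 1)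
        = (if (((PySem.List.slice colLine (some (r + 1)) none).filter (fun x => x ≠ ".")).head?
            = some "p") then (1 : Int) else 0) := by
      rw [hgetcol, scanA_eq_head_filter, PySem.List.slice_from colLine (by omega : (0:Int) ≤ r + 1)]
      have h2 := PySem.List.map_pyGetD_pyRange colLine "" (by omega : (0:Int) ≤ r + 1)
      rw [show PySem.List.pyRange (r + 1) (PySem.List.len colLine) 1
            = PySem.List.pyRange (r + 1) (board.length : Int) 1 from by
          rw [PySem.List.len_eq, hcollen]] at h2
      rw [h2]
    have hleft : scanA (fun j => cellAt board r j) (PySem.List.pyRange (c - 1) (-1) (-1))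
        = (if (((PySem.List.slice rowLine none (some c)).filter (fun x => x ≠ ".")).getLast?
            = some "p") then (1 : Int) else 0) := by
      rw [hgetrow, scanA_eq_head_filter,
        map_pyGetD_countdown rowLine "" c hc0 (by omega),
        List.filter_reverse, List.head?_reverse, PySem.List.slice_to rowLine hc0]
    have hright : scanA (fun j => cellAt board r j)
          (PySem.List.pyRange (c + 1) ((board.headD []).length : Int) 1)
        = (if (((PySem.List.slice rowLine (some (c + 1)) none).filter (fun x => x ≠ ".")).head?
            = some "p") then (1 : Int) else 0) := by
      rw [hgetrow, scanA_eq_head_filter, PySem.List.slice_from rowLine (by omega : (0:Int) ≤ c + 1)]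
      have h2 := PySem.List.map_pyGetD_pyRange rowLine "" (by omega : (0:Int) ≤ c + 1)
      rw [show PySem.List.pyRange (c + 1) (PySem.List.len rowLine) 1
            = PySem.List.pyRange (c + 1) ((board.headD []).length : Int) 1 from by
          rw [PySem.List.len_eq, hcols]] at h2
      rw [h2]
    simp only [lineHits]
    rw [hup, hdown, hleft, hright]
    ring
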